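-- pv_equiv track=rewrite | github.com/CASY82/CHH_StudyRoom | Algo/etcCode/algotest_2203191.py | solution
-- ===== SOURCE A (Python) =====
-- def sol(strings):
--     result = []
--     for i in range(1, len(strings)+1):
--         for j in range(i):
--             result.append(strings[j:j+len(strings)-i+1])
--     return result
--
-- def solution(goods):
--     answer = []
--     tmp = []
--
--     # 부분 문자열 다 구하기
--     for product in goods:
--         tmp.append(sol(product))
--
--     for word in range(len(tmp)):
--         result = set()
--         check = True
--         for part_word in tmp[word]:
--             for i in range(len(tmp)):
--                 if word == i:
--                     continue
--                 if part_word in tmp[i]: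
--                     check = False
--
--             if check:
--                 result.add(part_word)
--
--         answer.append(result)
--
--     return answer
-- ===== SOURCE B (Python) =====
-- def sol(strings):
--     result = []
--     for i in range(1, len(strings)+1):
--         for j in range(i):
--             result.append(strings[j:j+len(strings)-i+1])
--     return result
--
-- def solution(goods):
--     tmp = [sol(product) for product in goods]
--
--     # inverted index: substring -> set of word indices owning it
--     owners = {}
--     for i, subs in enumerate(tmp):
--         for s in subs:
--             owners.setdefault(s, set()).add(i)
--
--     answer = []
--     for w, subs in enumerate(tmp):
--         result = set()
--         for s in subs:
--             if any(i != w for i in owners[s]):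
--                 break
--             result.add(s)
--         answer.append(result)
--     return answer
-- ===== Notes on version B (the rewrite author's own statement) =====
-- stated objective: faster
-- what changed: B builds an inverted index (dict substring -> set of owner word-indices) in one pass over all substring lists, then scans each word's substrings once with a single O(1) lookup per substring and breaks at the first shared one, replacing A's nested rescans of every other word's substring list for every substring and A's dead iterations after its check flag goes false.
import Mathlib
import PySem

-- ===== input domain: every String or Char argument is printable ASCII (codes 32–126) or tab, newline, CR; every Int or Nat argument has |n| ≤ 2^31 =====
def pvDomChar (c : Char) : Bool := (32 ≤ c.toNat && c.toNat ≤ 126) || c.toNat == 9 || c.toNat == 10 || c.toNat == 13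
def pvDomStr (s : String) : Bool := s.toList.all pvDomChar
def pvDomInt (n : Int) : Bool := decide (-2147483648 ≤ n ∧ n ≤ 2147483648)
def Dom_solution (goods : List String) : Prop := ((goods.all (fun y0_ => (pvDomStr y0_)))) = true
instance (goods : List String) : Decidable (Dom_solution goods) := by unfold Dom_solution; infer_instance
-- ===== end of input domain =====

-- B replaces A's per-substring rescan of every other word's substring list by an inverted
-- index built once (substring -> set of owner word-indices) plus one break-at-first-shared pass per word (faster).

-- shared helper 'sol' (identical in both Python sources): all substrings in A's generation order
def sol (strings : String) : List String :=
  (PySem.List.pyRange 1 (PySem.Str.len strings + 1) 1).foldl (fun result i =>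
    (PySem.List.pyRange 0 i 1).foldl (fun result j =>
      result ++ [PySem.Str.slice strings (some j) (some (j + PySem.Str.len strings - i + 1))]) result) []

-- ===== PORT A =====
def solution (goods : List String) : List (List String) :=
  let tmp : List (List String) := goods.foldl (fun tmp product => tmp ++ [sol product]) []
  (PySem.List.pyRange 0 (tmp.length : Int) 1).foldl (fun answer word =>
    let r :=
      (PySem.List.pyGetD tmp word []).foldl
        (fun (st : PySem.Set String × Bool) part_word =>
          let check :=
            (PySem.List.pyRange 0 (tmp.length : Int) 1).foldl
              (fun check i =>
                if word == i then check
                else if (PySem.List.pyGetD tmp i []).contains part_word then false else check)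
              st.2
          if check then (PySem.Set.add st.1 part_word, check) else (st.1, check))
        (PySem.Set.empty, true)
    answer ++ [r.1]) []

-- ===== PORT B =====
-- owners.setdefault(s, set()).add(i)  ==  modify-in-place with default empty set
def ownersIndex (tmp : List (List String)) : PySem.Dict String (PySem.Set Int) :=
  (PySem.List.enumerate tmp 0).foldl
    (fun d p => p.2.foldl (fun d s => d.modify s PySem.Set.empty (fun st => PySem.Set.add st p.1)) d)
    PySem.Dict.empty

-- the per-word loop with break: collect the prefix of substrings owned by no other word
-- (owners[s] in Python: s is always a key when queried, so getD's default is never used)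
def collectFree (owners : PySem.Dict String (PySem.Set Int)) (w : Int) :
    List String → PySem.Set String → PySem.Set String
  | [], res => res
  | s :: rest, res =>
    if (PySem.Dict.getD owners s PySem.Set.empty).any (fun i => i != w) then res
    else collectFree owners w rest (PySem.Set.add res s)

def solution_alt (goods : List String) : List (List String) :=
  let tmp : List (List String) := goods.map sol
  let owners := ownersIndex tmp
  (PySem.List.enumerate tmp 0).foldl
    (fun answer p => answer ++ [collectFree owners p.1 p.2 PySem.Set.empty]) []

-- ===== PRECONDITION & SPEC =====
def Spec_solution (goods : List String) (out : List (List String)) : Prop := out = solution_alt goods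
instance (goods : List String) (out : List (List String)) : Decidable (Spec_solution goods out) := by unfold Spec_solution; infer_instance

-- ===== CLAIM (what is proved, stated in full; the proofs are below) =====
def Claim_equal_solution : Prop := ∀ (goods : List String), Dom_solution goods → Spec_solution goods (solution goods)

-- ===== LEMMAS AND PROOFS =====

-- index membership, inner loop: after registering owner j for every substring in subs
theorem mem_ownersIndex_inner (subs : List String) (d : PySem.Dict String (PySem.Set Int))
    (j : Int) (s : String) (i : Int) :
    (i ∈ PySem.Dict.getD (subs.foldl (fun d s' => d.modify s' PySem.Set.empty (fun st => PySem.Set.add st j)) d) s PySem.Set.empty)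
      ↔ i ∈ PySem.Dict.getD d s PySem.Set.empty ∨ (s ∈ subs ∧ i = j) := by
  induction subs generalizing d with
  | nil => simp
  | cons s' rest ih =>
    simp only [List.foldl_cons, ih]
    by_cases hs : s = s'
    · subst hs
      rw [PySem.Dict.getD_modify_self]
      simp only [PySem.Set.mem_add, List.mem_cons]
      tauto
    · rw [PySem.Dict.getD_modify_of_ne _ _ _ hs]
      simp only [List.mem_cons]
      constructor
      · rintro (h | ⟨h1, h2⟩)
        · exact Or.inl h
        · exact Or.inr ⟨Or.inr h1, h2⟩
      · rintro (h | ⟨h1 | h1, h2⟩)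
        · exact Or.inl h
        · exact absurd h1 hs
        · exact Or.inr ⟨h1, h2⟩

-- index membership, outer loop over any list of (index, substrings) pairs
theorem mem_ownersIndex_fold (L : List (Int × List String)) (d : PySem.Dict String (PySem.Set Int))
    (s : String) (i : Int) :
    (i ∈ PySem.Dict.getD (L.foldl (fun d p => p.2.foldl (fun d s => d.modify s PySem.Set.empty (fun st => PySem.Set.add st p.1)) d) d) s PySem.Set.empty)
      ↔ i ∈ PySem.Dict.getD d s PySem.Set.empty ∨ ∃ p ∈ L, s ∈ p.2 ∧ i = p.1 := by
  induction L generalizing d with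
  | nil => simp
  | cons q rest ih =>
    simp only [List.foldl_cons, ih, mem_ownersIndex_inner, List.mem_cons]
    constructor
    · rintro ((h | ⟨h1, h2⟩) | ⟨p, hp, h1, h2⟩)
      · exact Or.inl h
      · exact Or.inr ⟨q, Or.inl rfl, h1, h2⟩
      · exact Or.inr ⟨p, Or.inr hp, h1, h2⟩
    · rintro (h | ⟨p, hp | hp, h1, h2⟩)
      · exact Or.inl (Or.inl h)
      · exact Or.inl (Or.inr ⟨hp ▸ h1, hp ▸ h2⟩)
      · exact Or.inr ⟨p, hp, h1, h2⟩

-- i owns s in the index iff word number i's substring list contains s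
theorem mem_ownersIndex (tmp : List (List String)) (s : String) (i : Int) :
    (i ∈ PySem.Dict.getD (ownersIndex tmp) s PySem.Set.empty)
      ↔ ∃ k : Nat, ∃ _ : k < tmp.length, s ∈ tmp[k] ∧ i = (k : Int) := by
  unfold ownersIndex
  rw [mem_ownersIndex_fold]
  simp only [PySem.Dict.getD_empty]
  constructor
  · rintro (h | ⟨p, hp, h1, h2⟩)
    · simp [PySem.Set.empty] at h
    · rw [PySem.List.mem_enumerate_iff] at hp
      obtain ⟨k, hk, rfl⟩ := hp
      exact ⟨k, hk, h1, by simpa using h2⟩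
  · rintro ⟨k, hk, h1, h2⟩
    refine Or.inr ⟨((k : Int), tmp[k]), ?_, h1, h2⟩
    rw [PySem.List.mem_enumerate_iff]
    exact ⟨k, hk, by simp⟩

-- the B-side lookup decides exactly what A's inner scan over all other words decides
theorem sharedB_eq (tmp : List (List String)) (word : Int) (s : String) :
    (PySem.Dict.getD (ownersIndex tmp) s PySem.Set.empty).any (fun i => i != word)
      = (PySem.List.pyRange 0 (tmp.length : Int) 1).any
          (fun i => !(word == i) && (PySem.List.pyGetD tmp i []).contains s) := by
  rw [Bool.eq_iff_iff]
  simp only [List.any_eq_true, mem_ownersIndex, PySem.List.mem_pyRange_one,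
    Bool.and_eq_true, Bool.not_eq_true', beq_eq_false_iff_ne, bne_iff_ne, ne_eq,
    List.contains_eq_mem, decide_eq_true_eq]
  constructor
  · rintro ⟨i, ⟨k, hk, hs, rfl⟩, hne⟩
    refine ⟨(k : Int), ⟨by positivity, by exact_mod_cast hk⟩, fun h => hne h.symm, ?_⟩
    rw [PySem.List.pyGetD_natCast, List.getD_eq_getElem _ _ hk]
    exact hs
  · rintro ⟨i, ⟨h0, hlt⟩, hne, hmem⟩
    rw [PySem.List.pyGetD_of_nonneg _ _ h0] at hmem
    have hk : i.toNat < tmp.length := by omega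
    rw [List.getD_eq_getElem _ _ hk] at hmem
    exact ⟨i, ⟨i.toNat, hk, hmem, by omega⟩, fun h => hne h.symm⟩

-- A's inner flag loop computes check && not("s occurs in some other word's list")
theorem innerCheck (tmp : List (List String)) (word : Int) (s : String) (c : Bool) :
    (PySem.List.pyRange 0 (tmp.length : Int) 1).foldl
      (fun check i =>
        if word == i then check
        else if (PySem.List.pyGetD tmp i []).contains s then false else check) c
    = (c && !(PySem.List.pyRange 0 (tmp.length : Int) 1).any
          (fun i => !(word == i) && (PySem.List.pyGetD tmp i []).contains s)) := by
  rw [PySem.List.foldl_congr_mem _ _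
      (fun check i => if (!(word == i) && (PySem.List.pyGetD tmp i []).contains s) = true then false else check) _ ?_]
  · exact PySem.List.foldl_if_false_eq _ _ _
  · intro acc x _
    by_cases h : word == x <;> simp [h]

-- once A's check flag is false, the rest of the loop changes nothing
theorem foldA_false (tmp : List (List String)) (word : Int) (subs : List String) (res : PySem.Set String) :
    (subs.foldl
      (fun (st : PySem.Set String × Bool) part_word =>
        let check :=
          (PySem.List.pyRange 0 (tmp.length : Int) 1).foldl
            (fun check i =>
              if word == i then check
              else if (PySem.List.pyGetD tmp i []).contains part_word then false else check)
            st.2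
        if check then (PySem.Set.add st.1 part_word, check) else (st.1, check))
      (res, false)).1 = res := by
  induction subs generalizing res with
  | nil => rfl
  | cons s rest ih =>
    simp only [List.foldl_cons]
    rw [innerCheck]
    simp only [Bool.false_and, Bool.false_eq_true, reduceIte]
    exact ih res

-- A's flag loop from a true flag collects exactly B's break-at-first-shared prefix
theorem foldA_true (tmp : List (List String)) (word : Int) (subs : List String) (res : PySem.Set String) :
    (subs.foldl
      (fun (st : PySem.Set String × Bool) part_word =>
        let check :=
          (PySem.List.pyRange 0 (tmp.length : Int) 1).foldl
            (fun check i =>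
              if word == i then check
              else if (PySem.List.pyGetD tmp i []).contains part_word then false else check)
            st.2
        if check then (PySem.Set.add st.1 part_word, check) else (st.1, check))
      (res, true)).1 = collectFree (ownersIndex tmp) word subs res := by
  induction subs generalizing res with
  | nil => rfl
  | cons s rest ih =>
    simp only [List.foldl_cons, collectFree]
    rw [innerCheck]
    simp only [Bool.true_and]
    rw [sharedB_eq tmp word s]
    cases hb : (PySem.List.pyRange 0 (tmp.length : Int) 1).any
        (fun i => !(word == i) && (PySem.List.pyGetD tmp i []).contains s) with
    | false =>
      simp only [Bool.not_false, reduceIte, Bool.false_eq_true]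
      exact ih (PySem.Set.add res s)
    | true =>
      simp only [Bool.not_true, reduceIte, Bool.false_eq_true]
      exact foldA_false tmp word rest res

-- ===== VERDICT (by name: the statement is the Claim_ definition above) =====
theorem solution_spec : Claim_equal_solution := by
  intro goods _
  unfold Spec_solution solution solution_alt
  have htmp : goods.foldl (fun tmp product => tmp ++ [sol product]) [] = goods.map sol := by
    simpa using PySem.List.foldl_append_singleton_eq_map sol goods []
  rw [htmp]
  rw [PySem.List.foldl_append_singleton_eq_map, PySem.List.foldl_append_singleton_eq_map]
  simp only [List.nil_append]
  rw [PySem.List.enumerate_eq_map_pyRange (goods.map sol) [], List.map_map]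
  have hlen : PySem.List.len (goods.map sol) = ((goods.map sol).length : Int) := by
    simp [PySem.List.len]
  rw [hlen]
  apply List.map_congr_left
  intro word _
  simpa using foldA_true (goods.map sol) word (PySem.List.pyGetD (goods.map sol) word []) PySem.Set.empty
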